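-- pv_equiv track=rewrite | github.com/vidinalex/roblox-script-parser-plugin | server/app.py | parent_paths_by_service
-- ===== SOURCE A (Python) =====
-- def parent_paths_by_service(records: list[tuple[str, dict, list[str]]]) -> dict[str, set[tuple[str, ...]]]:
-- 	paths_by_service: dict[str, set[tuple[str, ...]]] = {}
-- 	for service, _item, normalized in records:
-- 		paths_by_service.setdefault(service, set()).add(tuple(normalized))
--
-- 	parent_by_service: dict[str, set[tuple[str, ...]]] = {}
-- 	for service, paths in paths_by_service.items():
-- 		parents: set[tuple[str, ...]] = set()
-- 		for path in paths:
-- 			for i in range(1, len(path)):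
-- 				prefix = path[:i]
-- 				if prefix in paths:
-- 					parents.add(prefix)
-- 		parent_by_service[service] = parents
-- 	return parent_by_service
-- ===== SOURCE B (Python) =====
-- def parent_paths_by_service(records: list[tuple[str, dict, list[str]]]) -> dict[str, set[tuple[str, ...]]]:
-- 	paths_by_service: dict[str, set[tuple[str, ...]]] = {}
-- 	for service, _item, normalized in records:
-- 		paths_by_service.setdefault(service, set()).add(tuple(normalized))
--
-- 	parent_by_service: dict[str, set[tuple[str, ...]]] = {}
-- 	for service, paths in paths_by_service.items():
-- 		# build a trie of the paths: edges[(node, comp)] -> child node; terminal = path-end nodes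
-- 		edges: dict[tuple[int, str], int] = {}
-- 		terminal: set[int] = set()
-- 		next_id = 1
-- 		for path in paths:
-- 			node = 0
-- 			for comp in path:
-- 				child = edges.get((node, comp))
-- 				if child is None:
-- 					child = next_id
-- 					next_id += 1
-- 					edges[(node, comp)] = child
-- 				node = child
-- 			terminal.add(node)
-- 		# a proper prefix of a path is itself a path iff its trie node is terminal
-- 		parents: set[tuple[str, ...]] = set()
-- 		for path in paths:
-- 			node = 0
-- 			prefix: list[str] = []
-- 			for comp in path[:-1]:
-- 				node = edges[(node, comp)]
-- 				prefix.append(comp)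
-- 				if node in terminal:
-- 					parents.add(tuple(prefix))
-- 		parent_by_service[service] = parents
-- 	return parent_by_service
-- ===== Notes on version B (the rewrite author's own statement) =====
-- stated objective: faster
-- what changed: Instead of slicing out every proper prefix of every path and hashing it against the set of paths (O(L^2) work per path), B builds one trie per service (flat dict (node, component) -> child plus a terminal-node set) in O(total length) and then walks each path once, emitting a prefix exactly when its trie node is terminal, which discovers the same parents in the same order.
import Mathlib
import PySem

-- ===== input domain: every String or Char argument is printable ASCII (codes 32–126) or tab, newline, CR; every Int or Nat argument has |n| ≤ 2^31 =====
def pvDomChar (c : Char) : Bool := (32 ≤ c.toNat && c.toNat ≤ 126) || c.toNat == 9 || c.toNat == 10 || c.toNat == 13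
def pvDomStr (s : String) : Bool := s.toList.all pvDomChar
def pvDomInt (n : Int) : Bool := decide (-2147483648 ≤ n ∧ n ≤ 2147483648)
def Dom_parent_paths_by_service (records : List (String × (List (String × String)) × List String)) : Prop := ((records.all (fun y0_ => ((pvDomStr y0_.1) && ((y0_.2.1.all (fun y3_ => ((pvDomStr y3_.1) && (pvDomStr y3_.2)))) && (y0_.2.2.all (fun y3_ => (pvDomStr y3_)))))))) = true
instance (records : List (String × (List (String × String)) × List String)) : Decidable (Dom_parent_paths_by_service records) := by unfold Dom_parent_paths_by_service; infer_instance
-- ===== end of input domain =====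

-- B replaces A's per-prefix slice-and-hash membership test with a per-service trie
-- (built once, walked once per path), discovering the same parents in the same order.

-- ===== PORT A =====
def parent_paths_by_service (records : List (String × (List (String × String)) × List String)) : List (String × List (List String)) :=
  let pbs : PySem.Dict String (PySem.Set (List String)) :=
    records.foldl (fun d r => d.insert r.1 (PySem.Set.add (d.getD r.1 PySem.Set.empty) r.2.2)) PySem.Dict.empty
  let par : PySem.Dict String (PySem.Set (List String)) :=
    pbs.items.foldl (fun d sp =>
      let paths := sp.2
      let parents : PySem.Set (List String) :=
        paths.foldl (fun ps path =>
          (PySem.List.pyRange 1 (path.length : Int) 1).foldl (fun ps i =>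
            let pre := PySem.List.slice path none (some i)
            if PySem.Set.contains paths pre then PySem.Set.add ps pre else ps) ps)
          PySem.Set.empty
      d.insert sp.1 parents) PySem.Dict.empty
  par.items

-- ===== PORT B =====
-- B-side helpers: the per-service trie (edges keyed by (node, component); terminal node set)
def pvTrieInsertFrom (st : PySem.Dict (Int × String) Int × Int × Int) (v : List String) :
    PySem.Dict (Int × String) Int × Int × Int :=
  v.foldl (fun st comp =>
    match st.1.get? (st.2.2, comp) with
    | some child => (st.1, st.2.1, child)
    | none => (st.1.insert (st.2.2, comp) st.2.1, st.2.1 + 1, st.2.1)) st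

def pvBuildTrie (paths : List (List String)) :
    PySem.Dict (Int × String) Int × PySem.Set Int × Int :=
  paths.foldl (fun st path =>
    let r := pvTrieInsertFrom (st.1, st.2.2, 0) path
    (r.1, PySem.Set.add st.2.1 r.2.2, r.2.1)) (PySem.Dict.empty, PySem.Set.empty, 1)

def pvWalkParents (edges : PySem.Dict (Int × String) Int) (terminal : PySem.Set Int)
    (parents : PySem.Set (List String)) (path : List String) : PySem.Set (List String) :=
  -- Python: node = 0; prefix = []; for comp in path[:-1]: node = edges[(node, comp)]; …
  -- edges[(node, comp)] is direct indexing; the key always exists here (every proper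
  -- prefix of an inserted path has its edge), so the total getD with junk default -1 is exact.
  (PySem.List.slice path none (some (-1))).foldl
    (fun (st : PySem.Set (List String) × Int × List String) comp =>
      let node' := edges.getD (st.2.1, comp) (-1)
      let prefix' := st.2.2 ++ [comp]
      (if PySem.Set.contains terminal node' then PySem.Set.add st.1 prefix' else st.1, node', prefix'))
    (parents, 0, []) |>.1

def parent_paths_by_service_alt (records : List (String × (List (String × String)) × List String)) : List (String × List (List String)) :=
  let pbs : PySem.Dict String (PySem.Set (List String)) :=
    records.foldl (fun d r => d.insert r.1 (PySem.Set.add (d.getD r.1 PySem.Set.empty) r.2.2)) PySem.Dict.empty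
  let par : PySem.Dict String (PySem.Set (List String)) :=
    pbs.items.foldl (fun d sp =>
      let paths := sp.2
      let t := pvBuildTrie paths
      let parents := paths.foldl (pvWalkParents t.1 t.2.1) PySem.Set.empty
      d.insert sp.1 parents) PySem.Dict.empty
  par.items

-- ===== PRECONDITION & SPEC =====
def Spec_parent_paths_by_service (records : List (String × (List (String × String)) × List String)) (out : List (String × List (List String))) : Prop := out = parent_paths_by_service_alt records
instance (records : List (String × (List (String × String)) × List String)) (out : List (String × List (List String))) : Decidable (Spec_parent_paths_by_service records out) := by unfold Spec_parent_paths_by_service; infer_instance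

-- ===== CLAIM (what is proved, stated in full; the proofs are below) =====
def Claim_equal_parent_paths_by_service : Prop := ∀ (records : List (String × (List (String × String)) × List String)), Dom_parent_paths_by_service records → Spec_parent_paths_by_service records (parent_paths_by_service records)

-- ===== LEMMAS AND PROOFS =====

-- The abstract reading of a trie edge dict: walk a component list from a node.
def pvWalk? (e : PySem.Dict (Int × String) Int) (n : Int) : List String → Option Int
  | [] => some n
  | c :: rest =>
    match e.get? (n, c) with
    | some m => pvWalk? e m rest
    | none => none

theorem pvWalk?_append (e : PySem.Dict (Int × String) Int) (n : Int) (u v : List String) :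
    pvWalk? e n (u ++ v) = (pvWalk? e n u).bind (fun m => pvWalk? e m v) := by
  induction u generalizing n with
  | nil => simp [pvWalk?]
  | cons c rest ih =>
    simp only [List.cons_append, pvWalk?]
    cases e.get? (n, c) with
    | none => simp
    | some m => simpa using ih m

-- A well-formed trie state: reached nodes are < id, the walk is injective from the root,
-- and every edge source is reachable from the root.
def pvGood (e : PySem.Dict (Int × String) Int) (id : Int) : Prop :=
  (∀ p n, pvWalk? e 0 p = some n → n < id) ∧
  (∀ p q n, pvWalk? e 0 p = some n → pvWalk? e 0 q = some n → p = q) ∧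
  (∀ n c m, e.get? (n, c) = some m → ∃ u, pvWalk? e 0 u = some n)

theorem pvWalk?_mono (e : PySem.Dict (Int × String) Int) (a : Int × String) (v : Int)
    (ha : e.get? a = none) (n : Int) (p : List String) (r : Int)
    (h : pvWalk? e n p = some r) : pvWalk? (e.insert a v) n p = some r := by
  induction p generalizing n with
  | nil => exact h
  | cons c rest ih =>
    simp only [pvWalk?] at h ⊢
    cases hg : e.get? (n, c) with
    | none => rw [hg] at h; simp at h
    | some m =>
      rw [hg] at h
      have hne : (n, c) ≠ a := by rintro rfl; rw [ha] at hg; simp at hg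
      rw [PySem.Dict.get?_insert, if_neg hne, hg]
      exact ih m h

-- Inserting one fresh edge (node,c) ↦ id: any successful walk from 0 is either old or exactly u ++ [c].
theorem pvWalk?_insert_cases (e : PySem.Dict (Int × String) Int) (id : Int)
    (hg : pvGood e id) (u : List String) (node : Int)
    (hu : pvWalk? e 0 u = some node) (c : String) (_hc : e.get? (node, c) = none)
    (p : List String) (r : Int)
    (h : pvWalk? (e.insert (node, c) id) 0 p = some r) :
    pvWalk? e 0 p = some r ∨ (p = u ++ [c] ∧ r = id) := by
  obtain ⟨hb, hinj, hsrc⟩ := hg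
  -- generalized: from any start n, a new walk factors as s ++ [c] with walk e n s = some node
  have main : ∀ p n r, pvWalk? (e.insert (node, c) id) n p = some r →
      pvWalk? e n p = some r ∨ (∃ s, p = s ++ [c] ∧ pvWalk? e n s = some node ∧ r = id) := by
    intro p
    induction p with
    | nil => intro n r h; exact Or.inl h
    | cons c' rest ih =>
      intro n r h
      simp only [pvWalk?] at h
      by_cases hk : (n, c') = (node, c)
      · rw [PySem.Dict.get?_insert, if_pos hk] at h
        -- now walking rest from the fresh node id; id has no outgoing edges
        injection hk with hk1 hk2
        cases rest with
        | nil =>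
          simp [pvWalk?] at h
          exact Or.inr ⟨[], by simp [hk2], by simp [pvWalk?, hk1], h.symm⟩
        | cons c'' rest' =>
          exfalso
          simp only [pvWalk?] at h
          cases hgi : (e.insert (node, c) id).get? (id, c'') with
          | none => rw [hgi] at h; simp at h
          | some m =>
            rw [PySem.Dict.get?_insert] at hgi
            by_cases hk2 : (id, c'') = (node, c)
            · -- then node = id; but node is reachable so node < id
              injection hk2 with hk21 hk22
              have := hb u node hu
              omega
            · rw [if_neg hk2] at hgi
              obtain ⟨w, hw⟩ := hsrc id c'' m hgi
              have := hb w id hw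
              omega
      · rw [PySem.Dict.get?_insert, if_neg hk] at h
        cases hg2 : e.get? (n, c') with
        | none => rw [hg2] at h; simp at h
        | some m =>
          rw [hg2] at h
          rcases ih m r h with hold | ⟨s, rfl, hs, rfl⟩
          · left; simp only [pvWalk?, hg2]; exact hold
          · right
            exact ⟨c' :: s, rfl, by simp only [pvWalk?, hg2]; exact hs, rfl⟩
  rcases main p 0 r h with hold | ⟨s, rfl, hs, rfl⟩
  · exact Or.inl hold
  · exact Or.inr ⟨by rw [hinj s u node hs hu], rfl⟩

theorem pvGood_insert (e : PySem.Dict (Int × String) Int) (id : Int)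
    (hg : pvGood e id) (u : List String) (node : Int)
    (hu : pvWalk? e 0 u = some node) (c : String) (hc : e.get? (node, c) = none) :
    pvGood (e.insert (node, c) id) (id + 1) := by
  obtain ⟨hb, hinj, hsrc⟩ := hg
  refine ⟨?_, ?_, ?_⟩
  · intro p n h
    rcases pvWalk?_insert_cases e id ⟨hb, hinj, hsrc⟩ u node hu c hc p n h with hold | ⟨_, rfl⟩
    · have := hb p n hold; omega
    · omega
  · intro p q n hp hq
    rcases pvWalk?_insert_cases e id ⟨hb, hinj, hsrc⟩ u node hu c hc p n hp with hop | ⟨hp1, hp2⟩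
    · rcases pvWalk?_insert_cases e id ⟨hb, hinj, hsrc⟩ u node hu c hc q n hq with hoq | ⟨hq1, hq2⟩
      · exact hinj p q n hop hoq
      · have := hb p n hop; omega
    · rcases pvWalk?_insert_cases e id ⟨hb, hinj, hsrc⟩ u node hu c hc q n hq with hoq | ⟨hq1, hq2⟩
      · have := hb q n hoq; omega
      · rw [hp1, hq1]
  · intro n c' m hm
    rw [PySem.Dict.get?_insert] at hm
    by_cases hk : (n, c') = (node, c)
    · injection hk with hk1 hk2
      exact ⟨u, by rw [hk1]; exact pvWalk?_mono e (node, c) id hc 0 u node hu⟩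
    · rw [if_neg hk] at hm
      obtain ⟨w, hw⟩ := hsrc n c' m hm
      exact ⟨w, pvWalk?_mono e (node, c) id hc 0 w n hw⟩

-- pvTrieInsertFrom preserves pvGood, extends old walks, and ends at the walk of u ++ v.
theorem pvTrieInsertFrom_spec (v : List String) (e : PySem.Dict (Int × String) Int) (id : Int)
    (u : List String) (node : Int) (hg : pvGood e id) (hu : pvWalk? e 0 u = some node) :
    pvGood (pvTrieInsertFrom (e, id, node) v).1 (pvTrieInsertFrom (e, id, node) v).2.1 ∧
    (∀ p r, pvWalk? e 0 p = some r → pvWalk? (pvTrieInsertFrom (e, id, node) v).1 0 p = some r) ∧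
    pvWalk? (pvTrieInsertFrom (e, id, node) v).1 0 (u ++ v) = some (pvTrieInsertFrom (e, id, node) v).2.2 := by
  induction v generalizing e id u node with
  | nil => exact ⟨hg, fun p r h => h, by simpa using hu⟩
  | cons c rest ih =>
    have hstep : pvTrieInsertFrom (e, id, node) (c :: rest) =
        match e.get? (node, c) with
        | some child => pvTrieInsertFrom (e, id, child) rest
        | none => pvTrieInsertFrom (e.insert (node, c) id, id + 1, id) rest := by
      simp only [pvTrieInsertFrom, List.foldl_cons]
      cases e.get? (node, c) <;> rfl
    cases hgc : e.get? (node, c) with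
    | some child =>
      rw [hstep, hgc]
      have hu' : pvWalk? e 0 (u ++ [c]) = some child := by
        rw [pvWalk?_append, hu]; simp [pvWalk?, hgc]
      have := ih e id (u ++ [c]) child hg hu'
      simpa using this
    | none =>
      rw [hstep, hgc]
      have hg' : pvGood (e.insert (node, c) id) (id + 1) := pvGood_insert e id hg u node hu c hgc
      have hu' : pvWalk? (e.insert (node, c) id) 0 (u ++ [c]) = some id := by
        rw [pvWalk?_append, pvWalk?_mono e (node, c) id hgc 0 u node hu]
        simp [pvWalk?, PySem.Dict.get?_insert]
      have := ih (e.insert (node, c) id) (id + 1) (u ++ [c]) id hg' hu'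
      refine ⟨this.1, fun p r h => this.2.1 p r (pvWalk?_mono e (node, c) id hgc 0 p r h), by simpa using this.2.2⟩

-- walk over the empty dict succeeds only on []
theorem pvWalk?_empty (n : Int) (p : List String) (r : Int)
    (h : pvWalk? PySem.Dict.empty n p = some r) : p = [] ∧ r = n := by
  cases p with
  | nil => exact ⟨rfl, (Option.some.inj h).symm⟩
  | cons c rest => simp [pvWalk?, PySem.Dict.get?_empty] at h

theorem pvGood_empty : pvGood PySem.Dict.empty 1 := by
  refine ⟨?_, ?_, ?_⟩
  · intro p n h
    obtain ⟨_, rfl⟩ := pvWalk?_empty 0 p n h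
    omega
  · intro p q n hp hq
    obtain ⟨rfl, _⟩ := pvWalk?_empty 0 p n hp
    obtain ⟨rfl, _⟩ := pvWalk?_empty 0 q n hq
    rfl
  · intro n c m hm
    simp [PySem.Dict.get?_empty] at hm

-- the build fold, generalized over the starting state
theorem pvBuildTrie_go (P : List (List String))
    (e : PySem.Dict (Int × String) Int) (t : PySem.Set Int) (id : Int) (hg : pvGood e id) :
    pvGood (P.foldl (fun st path =>
        let r := pvTrieInsertFrom (st.1, st.2.2, 0) path
        (r.1, PySem.Set.add st.2.1 r.2.2, r.2.1)) (e, t, id)).1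
      (P.foldl (fun st path =>
        let r := pvTrieInsertFrom (st.1, st.2.2, 0) path
        (r.1, PySem.Set.add st.2.1 r.2.2, r.2.1)) (e, t, id)).2.2 ∧
    (∀ p r, pvWalk? e 0 p = some r → pvWalk? (P.foldl (fun st path =>
        let r := pvTrieInsertFrom (st.1, st.2.2, 0) path
        (r.1, PySem.Set.add st.2.1 r.2.2, r.2.1)) (e, t, id)).1 0 p = some r) ∧
    (∀ n ∈ t, n ∈ (P.foldl (fun st path =>
        let r := pvTrieInsertFrom (st.1, st.2.2, 0) path
        (r.1, PySem.Set.add st.2.1 r.2.2, r.2.1)) (e, t, id)).2.1) ∧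
    (∀ p ∈ P, ∃ n, pvWalk? (P.foldl (fun st path =>
        let r := pvTrieInsertFrom (st.1, st.2.2, 0) path
        (r.1, PySem.Set.add st.2.1 r.2.2, r.2.1)) (e, t, id)).1 0 p = some n ∧
        n ∈ (P.foldl (fun st path =>
        let r := pvTrieInsertFrom (st.1, st.2.2, 0) path
        (r.1, PySem.Set.add st.2.1 r.2.2, r.2.1)) (e, t, id)).2.1) ∧
    (∀ n ∈ (P.foldl (fun st path =>
        let r := pvTrieInsertFrom (st.1, st.2.2, 0) path
        (r.1, PySem.Set.add st.2.1 r.2.2, r.2.1)) (e, t, id)).2.1,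
      n ∈ t ∨ ∃ p ∈ P, pvWalk? (P.foldl (fun st path =>
        let r := pvTrieInsertFrom (st.1, st.2.2, 0) path
        (r.1, PySem.Set.add st.2.1 r.2.2, r.2.1)) (e, t, id)).1 0 p = some n) := by
  induction P generalizing e t id with
  | nil =>
    exact ⟨hg, fun p r h => h, fun n hn => hn, by simp, fun n hn => Or.inl hn⟩
  | cons path rest ih =>
    simp only [List.foldl_cons]
    have hins := pvTrieInsertFrom_spec path e id [] 0 hg rfl
    obtain ⟨hg', hext, hwalk⟩ := hins
    simp only [List.nil_append] at hwalk
    obtain ⟨ihg, ihext, ihmem, ihall, ihonly⟩ :=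
      ih (pvTrieInsertFrom (e, id, 0) path).1
        (PySem.Set.add t (pvTrieInsertFrom (e, id, 0) path).2.2)
        (pvTrieInsertFrom (e, id, 0) path).2.1 hg'
    refine ⟨ihg, ?_, ?_, ?_, ?_⟩
    · intro p r h
      exact ihext p r (hext p r h)
    · intro n hn
      exact ihmem n (by rw [PySem.Set.mem_add]; exact Or.inl hn)
    · intro p hp
      rcases List.mem_cons.mp hp with rfl | hp
      · exact ⟨(pvTrieInsertFrom (e, id, 0) p).2.2,
          ihext _ _ hwalk, ihmem _ (by rw [PySem.Set.mem_add]; exact Or.inr rfl)⟩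
      · exact ihall p hp
    · intro n hn
      rcases ihonly n hn with hn' | ⟨p, hp, hw⟩
      · rw [PySem.Set.mem_add] at hn'
        rcases hn' with hn' | rfl
        · exact Or.inl hn'
        · exact Or.inr ⟨path, List.mem_cons_self, ihext _ _ hwalk⟩
      · exact Or.inr ⟨p, by simp [hp], hw⟩

-- The built trie: Good, every inserted path walks to a terminal node, terminal = walk-images.
theorem pvBuildTrie_facts (P : List (List String)) :
    pvGood (pvBuildTrie P).1 (pvBuildTrie P).2.2 ∧
    (∀ p ∈ P, ∃ n, pvWalk? (pvBuildTrie P).1 0 p = some n ∧ n ∈ (pvBuildTrie P).2.1) ∧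
    (∀ n ∈ (pvBuildTrie P).2.1, ∃ p ∈ P, pvWalk? (pvBuildTrie P).1 0 p = some n) := by
  obtain ⟨h1, _, _, h4, h5⟩ := pvBuildTrie_go P PySem.Dict.empty PySem.Set.empty 1 pvGood_empty
  refine ⟨h1, h4, ?_⟩
  intro n hn
  rcases h5 n hn with hn' | h
  · simp [PySem.Set.empty] at hn'
  · exact h

-- the canonical per-path prefix scan both inner loops compute
def pvCanon (PS : List (List String)) (ps : PySem.Set (List String)) (u : List String) :
    List String → PySem.Set (List String)
  | [] => ps
  | c :: rest =>
    pvCanon PS (if PySem.Set.contains PS (u ++ [c]) then PySem.Set.add ps (u ++ [c]) else ps)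
      (u ++ [c]) rest

theorem pvFoldlCongr {α β : Type} (l : List β) (f g : α → β → α) (i : α)
    (h : ∀ b ∈ l, ∀ a, f a b = g a b) : l.foldl f i = l.foldl g i := by
  induction l generalizing i with
  | nil => rfl
  | cons b rest ih =>
    simp only [List.foldl_cons]
    rw [h b List.mem_cons_self]
    exact ih _ (fun b' hb' a => h b' (List.mem_cons_of_mem b hb') a)

-- B's walk of l (prefix u already consumed, node = walk u) is the canonical prefix scan
theorem pvB_inner (E : PySem.Dict (Int × String) Int) (T : PySem.Set Int)
    (PS : List (List String))
    (hinj : ∀ p q n, pvWalk? E 0 p = some n → pvWalk? E 0 q = some n → p = q)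
    (hT : ∀ n, n ∈ T ↔ ∃ p ∈ PS, pvWalk? E 0 p = some n)
    (l : List String) :
    ∀ (u : List String) (node : Int) (ps : PySem.Set (List String)),
      pvWalk? E 0 u = some node → (∃ m, pvWalk? E 0 (u ++ l) = some m) →
      (l.foldl (fun (st : PySem.Set (List String) × Int × List String) comp =>
        let node' := E.getD (st.2.1, comp) (-1)
        let prefix' := st.2.2 ++ [comp]
        (if PySem.Set.contains T node' then PySem.Set.add st.1 prefix' else st.1, node', prefix'))
        (ps, node, u)).1 = pvCanon PS ps u l := by
  induction l with
  | nil => intro u node ps _ _; rfl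
  | cons c rest ih =>
    intro u node ps hu hdef
    obtain ⟨m, hm⟩ := hdef
    rw [pvWalk?_append, hu] at hm
    simp only [Option.bind_some, pvWalk?] at hm
    cases hg : E.get? (node, c) with
    | none => rw [hg] at hm; simp at hm
    | some m1 =>
      rw [hg] at hm
      have hgetD : E.getD (node, c) (-1) = m1 := by
        rw [PySem.Dict.getD_eq_get?_getD, hg]; rfl
      have huc : pvWalk? E 0 (u ++ [c]) = some m1 := by
        rw [pvWalk?_append, hu]; simp [pvWalk?, hg]
      have hiff : m1 ∈ T ↔ (u ++ [c]) ∈ PS := by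
        constructor
        · intro hmem
          obtain ⟨p, hp, hw⟩ := (hT m1).mp hmem
          have hpe : p = u ++ [c] := hinj p (u ++ [c]) m1 hw huc
          exact hpe ▸ hp
        · intro hmem
          exact (hT m1).mpr ⟨u ++ [c], hmem, huc⟩
      have hcond : PySem.Set.contains T m1 = PySem.Set.contains PS (u ++ [c]) := by
        cases hc1 : PySem.Set.contains T m1 <;> cases hc2 : PySem.Set.contains PS (u ++ [c])
        · rfl
        · exfalso
          have hx : PySem.Set.contains T m1 = true :=
            (PySem.Set.contains_iff _ _).mpr (hiff.mpr ((PySem.Set.contains_iff _ _).mp hc2))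
          rw [hc1] at hx; exact Bool.false_ne_true hx
        · exfalso
          have hx : PySem.Set.contains PS (u ++ [c]) = true :=
            (PySem.Set.contains_iff _ _).mpr (hiff.mp ((PySem.Set.contains_iff _ _).mp hc1))
          rw [hc2] at hx; exact Bool.false_ne_true hx
        · rfl
      simp only [List.foldl_cons]
      have hrec := ih (u ++ [c]) m1
        (if PySem.Set.contains T (E.getD (node, c) (-1)) then PySem.Set.add ps (u ++ [c]) else ps)
        huc ⟨m, by rw [pvWalk?_append, huc]; simpa using hm⟩
      simp only [pvCanon]
      rw [hgetD, hcond] at hrec ⊢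
      exact hrec

-- A's pyRange-of-slices scan is the same canonical prefix scan
theorem pvA_inner (PS : List (List String)) (path : List String) (l : List String) :
    ∀ (k : Nat) (ps : PySem.Set (List String)), path.dropLast.drop k = l →
    (PySem.List.pyRange ((k : Int) + 1) (path.length : Int) 1).foldl
      (fun ps i =>
        if PySem.Set.contains PS (PySem.List.slice path none (some i)) then
          PySem.Set.add ps (PySem.List.slice path none (some i))
        else ps) ps
    = pvCanon PS ps (path.take k) l := by
  induction l with
  | nil =>
    intro k ps h
    have hlen : path.dropLast.length ≤ k := by
      have hl := congrArg List.length h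
      simp only [List.length_drop, List.length_nil] at hl
      omega
    have hd : path.dropLast.length = path.length - 1 := List.length_dropLast
    have hlen2 : path.length ≤ k + 1 := by omega
    rw [PySem.List.pyRange_one_eq_nil (by omega)]
    rfl
  | cons c rest ih =>
    intro k ps h
    have hk : k < path.dropLast.length := by
      rcases Nat.lt_or_ge k path.dropLast.length with h' | h'
      · exact h'
      · rw [List.drop_eq_nil_of_le h'] at h
        exact absurd h (by simp)
    have hd : path.dropLast.length = path.length - 1 := List.length_dropLast
    have hpathlen : 1 ≤ path.length := by omega
    rw [PySem.List.pyRange_one_cons (by omega)]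
    simp only [List.foldl_cons]
    have hgetk : path[k]? = some c := by
      have h0 : (path.dropLast.drop k)[0]? = some c := by rw [h]; rfl
      rw [List.getElem?_drop] at h0
      rw [List.dropLast_eq_take, List.getElem?_take] at h0
      simp at h0
      exact h0.2
    have hslice : PySem.List.slice path none (some ((k : Int) + 1)) = path.take (k + 1) := by
      have : ((k : Int) + 1) = ((k + 1 : Nat) : Int) := by push_cast; ring
      rw [this, PySem.List.slice_to_natCast]
    have htake : path.take (k + 1) = path.take k ++ [c] := by
      simp [List.take_add_one, hgetk]
    have hdrop : path.dropLast.drop (k + 1) = rest := by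
      have h1 : (path.dropLast.drop k).drop 1 = rest := by rw [h]; rfl
      rw [List.drop_drop] at h1
      simpa [Nat.add_comm] using h1
    have ihk := ih (k + 1)
      (if PySem.Set.contains PS (path.take (k + 1)) then PySem.Set.add ps (path.take (k + 1)) else ps)
      hdrop
    have hcast : (((k + 1 : Nat) : Int) + 1) = ((k : Int) + 1 + 1) := by push_cast; ring
    rw [hcast] at ihk
    simp only [pvCanon]
    rw [hslice]
    rw [← htake]
    exact ihk

-- a successful walk restricts to every prefix
theorem pvWalk?_prefix (E : PySem.Dict (Int × String) Int) (u v : List String) (n : Int)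
    (h : pvWalk? E 0 (u ++ v) = some n) : ∃ m, pvWalk? E 0 u = some m := by
  rw [pvWalk?_append] at h
  cases hu : pvWalk? E 0 u with
  | none => rw [hu] at h; simp at h
  | some m => exact ⟨m, rfl⟩

-- the per-service equality: A's inner double loop = B's trie build + walk
theorem pvService (PS : List (List String)) :
    PS.foldl (fun ps path =>
      (PySem.List.pyRange 1 (path.length : Int) 1).foldl (fun ps i =>
        if PySem.Set.contains PS (PySem.List.slice path none (some i)) then
          PySem.Set.add ps (PySem.List.slice path none (some i))
        else ps) ps) PySem.Set.empty
    = PS.foldl (pvWalkParents (pvBuildTrie PS).1 (pvBuildTrie PS).2.1) PySem.Set.empty := by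
  obtain ⟨⟨_, hinj, _⟩, hall, honly⟩ := pvBuildTrie_facts PS
  have hT : ∀ n, n ∈ (pvBuildTrie PS).2.1 ↔ ∃ p ∈ PS, pvWalk? (pvBuildTrie PS).1 0 p = some n := by
    intro n
    constructor
    · exact honly n
    · rintro ⟨p, hp, hw⟩
      obtain ⟨n', hw', hmem⟩ := hall p hp
      rw [hw] at hw'
      exact (Option.some.inj hw') ▸ hmem
  apply pvFoldlCongr
  intro path hpath ps
  obtain ⟨np, hnp, _⟩ := hall path hpath
  have hdef : ∃ m, pvWalk? (pvBuildTrie PS).1 0 path.dropLast = some m := by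
    rcases path.eq_nil_or_concat with rfl | ⟨ys, y, rfl⟩
    · exact ⟨0, rfl⟩
    · rw [List.concat_eq_append] at hnp ⊢
      rw [List.dropLast_concat]
      exact pvWalk?_prefix (pvBuildTrie PS).1 ys [y] np hnp
  have hB := pvB_inner (pvBuildTrie PS).1 (pvBuildTrie PS).2.1 PS hinj hT path.dropLast
    [] 0 ps rfl (by simpa using hdef)
  have hA := pvA_inner PS path path.dropLast 0 ps (by simp)
  simp only [Nat.cast_zero, zero_add, List.take_zero] at hA
  rw [hA]
  rw [pvWalkParents, PySem.List.slice_to_neg_one]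
  exact hB.symm

-- ===== VERDICT (by name: the statement is the Claim_ definition above) =====
theorem parent_paths_by_service_spec : Claim_equal_parent_paths_by_service := by
  intro records _
  unfold Spec_parent_paths_by_service
  unfold parent_paths_by_service parent_paths_by_service_alt
  apply congrArg PySem.Dict.items
  apply pvFoldlCongr
  intro sp _ d
  dsimp only
  apply congrArg
  exact pvService sp.2
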